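-- pv_equiv track=rewrite | github.com/srp33/WishBuilder | GSE62944_Tumor_FeatureCounts/ParseClinical.py | standardizeMissingValues
-- ===== SOURCE A (Python) =====
-- missingTerms = set(["[Not Applicable]", "[Not Available]", "[Not Evaluated]", "[Completed]", "[Unknown]", "[Discrepancy]", "[Not Reported]"])
--
-- def standardizeMissingValues(values):
--     standardized = []
--     for value in values:
--         isMissing = False
--         for missingTerm in missingTerms:
--             if missingTerm in value:
--                 standardized.append("NA")
--                 isMissing = True
--                 break
--
--         if not isMissing:
--             standardized.append(value)
--
--     return standardized
-- ===== SOURCE B (Python) =====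
-- import re
--
-- missingTerms = set(["[Not Applicable]", "[Not Available]", "[Not Evaluated]", "[Completed]", "[Unknown]", "[Discrepancy]", "[Not Reported]"])
--
-- _pattern = re.compile('|'.join(re.escape(t) for t in missingTerms))
--
-- def standardizeMissingValues(values):
--     return ["NA" if _pattern.search(value) else value for value in values]
-- ===== Notes on version B (the rewrite author's own statement) =====
-- stated objective: idiomatic
-- what changed: Replaces the explicit accumulator loop with a flag and a 7-way inner substring loop by a single precompiled regex alternation searched once per value inside a list comprehension.
import Mathlib
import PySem

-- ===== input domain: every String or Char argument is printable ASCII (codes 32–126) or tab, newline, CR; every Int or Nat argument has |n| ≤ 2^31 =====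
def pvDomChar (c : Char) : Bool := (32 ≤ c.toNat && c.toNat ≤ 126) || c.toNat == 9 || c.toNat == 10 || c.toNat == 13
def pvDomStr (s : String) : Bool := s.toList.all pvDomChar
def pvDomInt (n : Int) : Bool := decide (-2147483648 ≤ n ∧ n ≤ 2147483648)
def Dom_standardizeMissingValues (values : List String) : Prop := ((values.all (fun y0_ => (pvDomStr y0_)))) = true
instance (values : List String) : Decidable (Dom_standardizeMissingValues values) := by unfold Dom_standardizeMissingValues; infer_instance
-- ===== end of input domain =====

-- B replaces A's accumulator loop with inner 7-term substring loop by a single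
-- any-marker match inside a list comprehension (idiomatic; Python B uses one precompiled regex).


-- ===== PORT A =====
-- the module-level set of missing terms (as the distinct elements, in the literal's order;
-- A only membership-tests each term against the value and breaks, so set order does not affect the output)
def missingTermsA : List String :=
  PySem.Set.ofList ["[Not Applicable]", "[Not Available]", "[Not Evaluated]", "[Completed]", "[Unknown]", "[Discrepancy]", "[Not Reported]"]

-- inner 'for missingTerm in missingTerms: if missingTerm in value: append "NA"; isMissing = True; break'
-- returns the (possibly extended) accumulator and the isMissing flag
def innerLoopA (terms : List String) (value : String) (standardized : List String) : List String × Bool :=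
  match terms with
  | [] => (standardized, false)
  | t :: ts =>
      if PySem.Str.isIn t value then (standardized ++ ["NA"], true)
      else innerLoopA ts value standardized

def standardizeMissingValues (values : List String) : List String :=
  values.foldl
    (fun standardized value =>
      let r := innerLoopA missingTermsA value standardized
      if !r.2 then r.1 ++ [value] else r.1)
    []

-- ===== PORT B =====
def missingTermsB : List String :=
  PySem.Set.ofList ["[Not Applicable]", "[Not Available]", "[Not Evaluated]", "[Completed]", "[Unknown]", "[Discrepancy]", "[Not Reported]"]

-- _pattern.search(value): the alternation of the escaped terms matches iff some term occurs in value
def standardizeMissingValues_alt (values : List String) : List String :=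
  values.map (fun value => if missingTermsB.any (fun t => PySem.Str.isIn t value) then "NA" else value)

-- ===== PRECONDITION & SPEC =====
def Spec_standardizeMissingValues (values : List String) (out : List String) : Prop := out = standardizeMissingValues_alt values
instance (values : List String) (out : List String) : Decidable (Spec_standardizeMissingValues values out) := by unfold Spec_standardizeMissingValues; infer_instance

-- ===== CLAIM (what is proved, stated in full; the proofs are below) =====
def Claim_equal_standardizeMissingValues : Prop := ∀ (values : List String), Dom_standardizeMissingValues values → Spec_standardizeMissingValues values (standardizeMissingValues values)

-- ===== LEMMAS AND PROOFS =====

-- A's inner loop appends "NA" iff some term occurs in the value, and never touches the flag otherwise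
theorem innerLoopA_eq (terms : List String) (value : String) (acc : List String) :
    innerLoopA terms value acc =
      if terms.any (fun t => PySem.Str.isIn t value) then (acc ++ ["NA"], true) else (acc, false) := by
  induction terms with
  | nil => simp [innerLoopA]
  | cons t ts ih =>
      unfold innerLoopA
      by_cases h : PySem.Str.isIn t value = true
      · rw [if_pos h, List.any_cons, h]
        simp
      · have hf : PySem.Str.isIn t value = false := by simpa using h
        rw [if_neg h, ih, List.any_cons, hf, Bool.false_or]

-- each step of A's outer loop appends exactly B's element
theorem stepA_eq (value : String) (acc : List String) :
    (let r := innerLoopA missingTermsA value acc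
     if !r.2 then r.1 ++ [value] else r.1) =
      acc ++ [if missingTermsB.any (fun t => PySem.Str.isIn t value) then "NA" else value] := by
  have hterms : missingTermsA = missingTermsB := rfl
  rw [innerLoopA_eq, hterms]
  by_cases hb : (missingTermsB.any (fun t => PySem.Str.isIn t value)) = true <;> simp only [hb, if_pos, if_neg, not_false_iff, Bool.not_true, Bool.not_false] <;> simp [hb]

-- ===== VERDICT (by name: the statement is the Claim_ definition above) =====
theorem standardizeMissingValues_spec : Claim_equal_standardizeMissingValues := by
  intro values _
  unfold Spec_standardizeMissingValues standardizeMissingValues standardizeMissingValues_alt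
  have h := PySem.List.foldl_append_singleton_eq_map
    (f := fun value => if missingTermsB.any (fun t => PySem.Str.isIn t value) then "NA" else value)
    (l := values) (acc := [])
  calc values.foldl
        (fun standardized value =>
          let r := innerLoopA missingTermsA value standardized
          if !r.2 then r.1 ++ [value] else r.1) []
      = values.foldl
        (fun standardized value =>
          standardized ++ [if missingTermsB.any (fun t => PySem.Str.isIn t value) then "NA" else value]) [] := by
        apply PySem.List.foldl_congr_mem
        intro acc value _
        exact stepA_eq value acc
    _ = values.map (fun value => if missingTermsB.any (fun t => PySem.Str.isIn t value) then "NA" else value) := by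
        simpa using h
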